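-- pv_equiv track=rewrite | github.com/Vanta1/cps109 | labs/lab4_funcs.py | digitcat
-- ===== SOURCE A (Python) =====
-- def digitcat(s):
--
--     '''
--     This function accepts a string 's' as input, extracts the
--     digit characters, and returns those digits as an integer.
--
--     For example, if 's' is the string:
--
--     'I want 3 oranges, 24 bananas, and 101 dalmations'
--
--     Then the function should return the integer 324101
--
--     If there are no digits, return None.
--
--     '''
--
--     a = 0 # answer
--     f = 0 # tally of found digits
--     for c in s[::-1]: # reverse the string, so that digits are processed starting from the 1s column
--         if c in ['0', '1', '2', '3', '4', '5', '6', '7', '8', '9']: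
--             a += int(c) * (10 ** f)
--             f += 1
--
--     if a == 0:
--         return None
--
--     return a
-- ===== SOURCE B (Python) =====
-- def digitcat(s):
--     n = 0
--     for c in s:
--         if '0' <= c <= '9':
--             n = 10 * n + ord(c) - 48
--     return n or None
-- ===== Notes on version B (the rewrite author's own statement) =====
-- stated objective: faster
-- what changed: B replaces A's reverse scan that accumulates digit*(10**f) with a freshly computed bignum power per digit by a single forward Horner pass (n = 10*n + digit), returning None exactly when the accumulated value is zero.
import Mathlib
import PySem

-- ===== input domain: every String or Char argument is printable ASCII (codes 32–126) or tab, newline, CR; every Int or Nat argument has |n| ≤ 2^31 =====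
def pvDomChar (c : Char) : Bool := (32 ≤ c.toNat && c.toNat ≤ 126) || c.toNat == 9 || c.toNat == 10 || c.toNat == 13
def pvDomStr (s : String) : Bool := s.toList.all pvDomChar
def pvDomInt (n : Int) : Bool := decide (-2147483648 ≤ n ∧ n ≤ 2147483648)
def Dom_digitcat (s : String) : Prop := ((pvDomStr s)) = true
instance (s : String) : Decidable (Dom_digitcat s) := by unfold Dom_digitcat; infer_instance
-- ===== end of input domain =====

-- B replaces A's reverse scan with per-digit bignum powers 10**f by a single forward
-- Horner pass (n = 10*n + digit); measurably faster, same return value everywhere.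

-- ===== PORT A =====
-- A: reverse the string, accumulate a += int(c) * 10**f over digit chars, tally f;
-- 'int(c)' for a single digit char is ported exactly as (c.toNat : Int) - 48.
def digitcatStep (st : Int × Int) (c : Char) : Int × Int :=
  if c ∈ ['0', '1', '2', '3', '4', '5', '6', '7', '8', '9'] then
    (st.1 + ((c.toNat : Int) - 48) * 10 ^ st.2.toNat, st.2 + 1)
  else st

def digitcat (s : String) : Option Int :=
  let r := (s.toList.reverse).foldl digitcatStep (0, 0)   -- for c in s[::-1]
  if r.1 = 0 then none else some r.1

-- ===== PORT B =====
-- B: forward Horner scan; 'ord(c) - 48' is (c.toNat : Int) - 48; 'n or None'.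
def digitcat_alt (s : String) : Option Int :=
  let n := s.toList.foldl
    (fun (n : Int) c => if '0' ≤ c ∧ c ≤ '9' then 10 * n + ((c.toNat : Int) - 48) else n) 0
  if n = 0 then none else some n

-- ===== PRECONDITION & SPEC =====
def Spec_digitcat (s : String) (out : Option Int) : Prop := out = digitcat_alt s
instance (s : String) (out : Option Int) : Decidable (Spec_digitcat s out) := by unfold Spec_digitcat; infer_instance

-- ===== CLAIM (what is proved, stated in full; the proofs are below) =====
def Claim_equal_digitcat : Prop := ∀ (s : String), Dom_digitcat s → Spec_digitcat s (digitcat s)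

-- ===== LEMMAS AND PROOFS =====

-- the two digit tests agree on every char
lemma digit_test_eq (c : Char) :
    (c ∈ ['0', '1', '2', '3', '4', '5', '6', '7', '8', '9']) ↔ ('0' ≤ c ∧ c ≤ '9') := by
  constructor
  · intro h
    fin_cases h <;> exact ⟨by decide, by decide⟩
  · rintro ⟨h1, h2⟩
    rw [Char.le_def, UInt32.le_iff_toNat_le] at h1 h2
    have h0 : ('0' : Char).val.toNat = 48 := by decide
    have h9 : ('9' : Char).val.toNat = 57 := by decide
    rw [h0] at h1; rw [h9] at h2
    have hc : ∀ (n : Nat) (d : Char), c.val.toNat = n → d.val.toNat = n → c = d := by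
      intro n d hcn hdn
      exact Char.ext (UInt32.toNat_inj.mp (by omega))
    have hv : c.val.toNat = 48 ∨ c.val.toNat = 49 ∨ c.val.toNat = 50 ∨ c.val.toNat = 51 ∨
        c.val.toNat = 52 ∨ c.val.toNat = 53 ∨ c.val.toNat = 54 ∨ c.val.toNat = 55 ∨
        c.val.toNat = 56 ∨ c.val.toNat = 57 := by omega
    rcases hv with h|h|h|h|h|h|h|h|h|h
    · simp [hc _ '0' h (by decide)]
    · simp [hc _ '1' h (by decide)]
    · simp [hc _ '2' h (by decide)]
    · simp [hc _ '3' h (by decide)]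
    · simp [hc _ '4' h (by decide)]
    · simp [hc _ '5' h (by decide)]
    · simp [hc _ '6' h (by decide)]
    · simp [hc _ '7' h (by decide)]
    · simp [hc _ '8' h (by decide)]
    · simp [hc _ '9' h (by decide)]

-- Horner value of a digit list (B's accumulator), as a function of the filtered chars
def hornerVal (ds : List Char) : Int :=
  ds.foldl (fun n c => 10 * n + ((c.toNat : Int) - 48)) 0

def isDig (c : Char) : Bool := decide (c ∈ ['0', '1', '2', '3', '4', '5', '6', '7', '8', '9'])

lemma hornerVal_append_singleton (ds : List Char) (c : Char) :
    hornerVal (ds ++ [c]) = 10 * hornerVal ds + ((c.toNat : Int) - 48) := by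
  simp [hornerVal]

-- A's fold over any char list m, from any state (a, f) with 0 ≤ f
lemma digitcat_fold (m : List Char) : ∀ (a f : Int), 0 ≤ f →
    m.foldl digitcatStep (a, f) =
      (a + hornerVal ((m.filter isDig).reverse) * 10 ^ f.toNat,
       f + (m.filter isDig).length) := by
  induction m with
  | nil => intro a f hf; simp [hornerVal]
  | cons c rest ih =>
    intro a f hf
    by_cases hc : isDig c = true
    · have hmem : c ∈ ['0', '1', '2', '3', '4', '5', '6', '7', '8', '9'] := by
        simpa [isDig] using hc
      rw [List.foldl_cons]
      rw [show digitcatStep (a, f) c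
            = (a + ((c.toNat : Int) - 48) * 10 ^ f.toNat, f + 1) by
          simp [digitcatStep, hmem]]
      rw [ih _ _ (by omega)]
      have hpow : (f + 1).toNat = f.toNat + 1 := by omega
      simp only [List.filter_cons, hc, if_true, List.reverse_cons, hornerVal_append_singleton,
        hpow, List.length_cons, Prod.mk.injEq, pow_succ]
      constructor <;> push_cast <;> ring
    · have hcf : isDig c = false := by simpa using hc
      have hmem : ¬ c ∈ ['0', '1', '2', '3', '4', '5', '6', '7', '8', '9'] := by
        simpa [isDig] using hcf
      rw [List.foldl_cons, show digitcatStep (a, f) c = (a, f) by simp [digitcatStep, hmem]]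
      rw [ih _ _ hf]
      simp [hcf]

-- B's fold equals the Horner value of the filtered chars
lemma alt_fold (l : List Char) : ∀ (n : Int),
    l.foldl (fun (n : Int) c => if '0' ≤ c ∧ c ≤ '9' then 10 * n + ((c.toNat : Int) - 48) else n) n
      = (l.filter isDig).foldl (fun n c => 10 * n + ((c.toNat : Int) - 48)) n := by
  induction l with
  | nil => intro n; rfl
  | cons c rest ih =>
    intro n
    by_cases hc : isDig c = true
    · have : '0' ≤ c ∧ c ≤ '9' := (digit_test_eq c).mp (by simpa [isDig] using hc)
      simp [hc, this, ih]
    · have : ¬ ('0' ≤ c ∧ c ≤ '9') := fun h => hc (by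
        simpa [isDig] using (digit_test_eq c).mpr h)
      simp [hc, this, ih]

-- ===== VERDICT (by name: the statement is the Claim_ definition above) =====
theorem digitcat_spec : Claim_equal_digitcat := by
  intro s _
  unfold Spec_digitcat digitcat digitcat_alt
  rw [digitcat_fold _ 0 0 le_rfl]
  rw [alt_fold]
  have : (s.toList.reverse.filter isDig).reverse = s.toList.filter isDig := by
    rw [← List.filter_reverse, List.reverse_reverse]
  simp [hornerVal]
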